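-- pv_equiv track=rewrite | github.com/pypi-data/pypi-mirror-397 | packages/Onya/onya-0.2.0-py3-none-any.whl/onya/serial/literate_lex.py | parse_multiline_text
-- ===== SOURCE A (Python) =====
-- def parse_multiline_text(lines, start_idx, current_indent):
--     '''
--     Parse multiline text that continues after a property definition.
--     Returns (text_content, next_line_idx)
--     '''
--     if start_idx >= len(lines):
--         return '', start_idx
--
--     text_lines = []
--     i = start_idx
--
--     while i < len(lines):
--         line = lines[i]
--
--         # Skip empty lines
--         if not line.strip():
--             i += 1
--             continue
--
--         # Check if this line is indented enough to be part of the multiline text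
--         # Must be indented more than the current property level
--         line_indent = len(line) - len(line.lstrip())
--         if line_indent > current_indent:
--             # This is a continuation line
--             text_lines.append(line[current_indent:])  # Remove the base indentation
--             i += 1
--         else:
--             # This line is not indented enough, stop parsing multiline text
--             break
--
--     return '\n'.join(text_lines), i
-- ===== SOURCE B (Python) =====
-- def parse_multiline_text(lines, start_idx, current_indent):
--     '''
--     Parse multiline text that continues after a property definition.
--     Returns (text_content, next_line_idx)
--     '''
--     if start_idx >= len(lines):
--         return '', start_idx
--
--     # Pass 1: find the boundary — advance past blank lines and
--     # properly-indented lines; stop at the first non-blank line whose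
--     # indentation is not greater than current_indent.
--     end = start_idx
--     while end < len(lines):
--         line = lines[end]
--         if line.strip():
--             if len(line) - len(line.lstrip()) <= current_indent:
--                 break
--         end += 1
--
--     # Pass 2: project the block — non-blank lines, base indentation removed.
--     text = '\n'.join(line[current_indent:] for line in lines[start_idx:end] if line.strip())
--     return text, end
-- ===== Notes on version B (the rewrite author's own statement) =====
-- stated objective: alternative
-- what changed: Replaces A's single interleaved scan that accumulates stripped continuation lines while skipping blanks with a two-pass decomposition: a boundary-finding loop that only computes the end index, then a comprehension projecting lines[start_idx:end] (blanks filtered, base indentation sliced off) joined in one step.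
-- outside the precondition, e.g. on parse_multiline_text(['  x'], -1, 0): A returns ('  x\n  x', 1), B returns ('  x', 1); on parse_multiline_text(['x'], -3, 0): A raises IndexError, B raises IndexError
import Mathlib
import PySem

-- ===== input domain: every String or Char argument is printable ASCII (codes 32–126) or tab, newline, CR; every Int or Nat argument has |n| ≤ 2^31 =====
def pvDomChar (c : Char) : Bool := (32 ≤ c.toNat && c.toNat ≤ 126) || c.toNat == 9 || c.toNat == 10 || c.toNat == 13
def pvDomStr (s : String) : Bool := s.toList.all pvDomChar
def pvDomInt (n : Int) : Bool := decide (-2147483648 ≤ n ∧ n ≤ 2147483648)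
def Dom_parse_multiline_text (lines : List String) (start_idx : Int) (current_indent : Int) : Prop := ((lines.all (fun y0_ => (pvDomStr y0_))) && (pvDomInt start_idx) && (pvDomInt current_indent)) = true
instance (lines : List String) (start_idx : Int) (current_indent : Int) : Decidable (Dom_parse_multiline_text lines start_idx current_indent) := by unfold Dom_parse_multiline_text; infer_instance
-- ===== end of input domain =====

-- B replaces A's single interleaved accumulate-while-scanning loop by a two-pass
-- decomposition (boundary-finding loop, then filter/map/join over the slice); objective: alternative.


-- ===== PORT A =====
-- A's while-loop: state = (accumulated text_lines, index i); skip blanks, append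
-- indented continuation lines (base indentation sliced off), break otherwise.
-- The loop is encoded with fuel = the exact number of remaining slots (len - i);
-- at fuel 0 the guard i < len is false, so both exits return the same pair.
def pvLoopA (lines : List String) (ci : Int) : List String → Int → Nat → String × Int
  | acc, i, 0 => (PySem.Str.join "\n" acc, i)
  | acc, i, n + 1 =>
    if i < (lines.length : Int) then
      match PySem.List.pyGet? lines i with
      | none => ("", i)   -- IndexError in Python (negative wraparound out of range; outside Pre_)
      | some line =>
        if PySem.Str.strip line = "" then
          pvLoopA lines ci acc (i + 1) n
        else if (PySem.Str.len line : Int) - (PySem.Str.len (PySem.Str.lstrip line) : Int) > ci then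
          pvLoopA lines ci (acc ++ [PySem.Str.slice line (some ci) none]) (i + 1) n
        else
          (PySem.Str.join "\n" acc, i)
    else
      (PySem.Str.join "\n" acc, i)

def parse_multiline_text (lines : List String) (start_idx : Int) (current_indent : Int) : String × Int :=
  if start_idx ≥ (lines.length : Int) then ("", start_idx)
  else pvLoopA lines current_indent [] start_idx ((lines.length : Int) - start_idx).toNat

-- ===== PORT B =====
-- B pass 1: boundary loop, no accumulator — advance past blank or over-indented
-- lines (same fuel encoding of the while loop).
def pvFindEnd (lines : List String) (ci : Int) : Int → Nat → Int
  | e, 0 => e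
  | e, n + 1 =>
    if e < (lines.length : Int) then
      match PySem.List.pyGet? lines e with
      | none => e   -- IndexError in Python (outside Pre_)
      | some line =>
        if PySem.Str.strip line = "" then
          pvFindEnd lines ci (e + 1) n
        else if (PySem.Str.len line : Int) - (PySem.Str.len (PySem.Str.lstrip line) : Int) ≤ ci then
          e
        else
          pvFindEnd lines ci (e + 1) n
    else
      e

def parse_multiline_text_alt (lines : List String) (start_idx : Int) (current_indent : Int) : String × Int :=
  if start_idx ≥ (lines.length : Int) then ("", start_idx)
  else
    let e := pvFindEnd lines current_indent start_idx ((lines.length : Int) - start_idx).toNat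
    -- pass 2: '\n'.join(line[current_indent:] for line in lines[start_idx:e] if line.strip())
    (PySem.Str.join "\n"
      (((PySem.List.slice lines (some start_idx) (some e)).filter
          (fun l => !(PySem.Str.strip l == ""))).map
        (fun l => PySem.Str.slice l (some current_indent) none)), e)

-- ===== PRECONDITION & SPEC =====
-- Pre_ excludes negative start_idx: there A raises IndexError when start_idx < -len(lines),
-- and for -len ≤ start_idx < 0 it reads lines through Python's negative-index wraparound
-- (re-reading lines twice), an accidental artefact of A's indexing no caller intends.
def Pre_parse_multiline_text (lines : List String) (start_idx : Int) (current_indent : Int) : Prop :=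
  0 ≤ start_idx
instance (lines : List String) (start_idx : Int) (current_indent : Int) : Decidable (Pre_parse_multiline_text lines start_idx current_indent) := by unfold Pre_parse_multiline_text; infer_instance

def pvWitness_parse_multiline_text : List String × Int × Int := (["  a", "", "  b", "c"], 0, 0)

def Spec_parse_multiline_text (lines : List String) (start_idx : Int) (current_indent : Int) (out : String × Int) : Prop := out = parse_multiline_text_alt lines start_idx current_indent
instance (lines : List String) (start_idx : Int) (current_indent : Int) (out : String × Int) : Decidable (Spec_parse_multiline_text lines start_idx current_indent out) := by unfold Spec_parse_multiline_text; infer_instance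

-- ===== CLAIM (what is proved, stated in full; the proofs are below) =====
def Claim_equal_parse_multiline_text : Prop := ∀ (lines : List String) (start_idx : Int) (current_indent : Int), Dom_parse_multiline_text lines start_idx current_indent → Pre_parse_multiline_text lines start_idx current_indent → Spec_parse_multiline_text lines start_idx current_indent (parse_multiline_text lines start_idx current_indent)

-- ===== LEMMAS AND PROOFS =====

-- Nat-level boundary function, used only by the proofs.
def pvFE (lines : List String) (ci : Int) (i : Nat) : Nat :=
  if h : i < lines.length then
    if PySem.Str.strip lines[i] = "" then pvFE lines ci (i + 1)
    else if (PySem.Str.len lines[i] : Int) - (PySem.Str.len (PySem.Str.lstrip lines[i]) : Int) ≤ ci then i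
    else pvFE lines ci (i + 1)
  else i
termination_by lines.length - i

lemma pvFE_ge (lines : List String) (ci : Int) (i : Nat) : i ≤ pvFE lines ci i := by
  induction i using pvFE.induct lines ci with
  | case1 i h h1 ih => rw [pvFE, dif_pos h, if_pos h1]; omega
  | case2 i h h1 h2 => rw [pvFE, dif_pos h, if_neg h1, if_pos h2]
  | case3 i h h1 h2 ih => rw [pvFE, dif_pos h, if_neg h1, if_neg h2]; omega
  | case4 i h => rw [pvFE, dif_neg h]

lemma pvFE_stop (lines : List String) (ci : Int) (i : Nat) (h : lines.length ≤ i) :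
    pvFE lines ci i = i := by
  rw [pvFE, dif_neg (by omega)]

lemma pvFindEnd_eq_pvFE (lines : List String) (ci : Int) :
    ∀ (n : Nat) (i : Nat), lines.length ≤ i + n →
      pvFindEnd lines ci (i : Int) n = ((pvFE lines ci i : Nat) : Int) := by
  intro n
  induction n with
  | zero =>
    intro i hn
    rw [pvFindEnd, pvFE_stop lines ci i (by omega)]
  | succ n ih =>
    intro i hn
    by_cases h : i < lines.length
    · have hI : (i : Int) < (lines.length : Int) := by exact_mod_cast h
      rw [pvFindEnd, if_pos hI]
      simp only [PySem.List.pyGet?_natCast, List.getElem?_eq_getElem h]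
      rw [pvFE, dif_pos h]
      by_cases h1 : PySem.Str.strip lines[i] = ""
      · rw [if_pos h1, if_pos h1,
          show ((i : Int) + 1) = ((i + 1 : Nat) : Int) by push_cast; ring]
        exact ih (i + 1) (by omega)
      · rw [if_neg h1, if_neg h1]
        by_cases h2 : (PySem.Str.len lines[i] : Int) - (PySem.Str.len (PySem.Str.lstrip lines[i]) : Int) ≤ ci
        · rw [if_pos h2, if_pos h2]
        · rw [if_neg h2, if_neg h2,
            show ((i : Int) + 1) = ((i + 1 : Nat) : Int) by push_cast; ring]
          exact ih (i + 1) (by omega)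
    · have hI : ¬ ((i : Int) < (lines.length : Int)) := by exact_mod_cast h
      rw [pvFindEnd, if_neg hI, pvFE_stop lines ci i (by omega)]

-- The projection both sides build over the block [i, e).
def pvProj (lines : List String) (ci : Int) (i e : Nat) : List String :=
  (((lines.drop i).take (e - i)).filter (fun l => !(PySem.Str.strip l == ""))).map
    (fun l => PySem.Str.slice l (some ci) none)

lemma pvLoopA_eq (lines : List String) (ci : Int) :
    ∀ (n : Nat) (i : Nat) (acc : List String), lines.length ≤ i + n →
      pvLoopA lines ci acc (i : Int) n =
        (PySem.Str.join "\n" (acc ++ pvProj lines ci i (pvFE lines ci i)),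
          ((pvFE lines ci i : Nat) : Int)) := by
  intro n
  induction n with
  | zero =>
    intro i acc hn
    rw [pvLoopA, pvFE_stop lines ci i (by omega)]
    unfold pvProj
    simp
  | succ n ih =>
    intro i acc hn
    by_cases h : i < lines.length
    · have hI : (i : Int) < (lines.length : Int) := by exact_mod_cast h
      rw [pvLoopA, if_pos hI]
      simp only [PySem.List.pyGet?_natCast, List.getElem?_eq_getElem h]
      rw [pvFE, dif_pos h]
      by_cases h1 : PySem.Str.strip lines[i] = ""
      · rw [if_pos h1, if_pos h1,
          show ((i : Int) + 1) = ((i + 1 : Nat) : Int) by push_cast; ring,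
          ih (i + 1) acc (by omega)]
        have hge : i + 1 ≤ pvFE lines ci (i + 1) := pvFE_ge lines ci (i + 1)
        congr 2
        unfold pvProj
        rw [List.drop_eq_getElem_cons h,
          show pvFE lines ci (i + 1) - i = (pvFE lines ci (i + 1) - (i + 1)) + 1 by omega,
          List.take_succ_cons, List.filter_cons]
        simp [h1]
      · rw [if_neg h1, if_neg h1]
        by_cases h2 : (PySem.Str.len lines[i] : Int) - (PySem.Str.len (PySem.Str.lstrip lines[i]) : Int) ≤ ci
        · rw [if_neg (by omega : ¬ ((PySem.Str.len lines[i] : Int) - (PySem.Str.len (PySem.Str.lstrip lines[i]) : Int) > ci)), if_pos h2]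
          unfold pvProj
          simp
        · rw [if_pos (by omega : (PySem.Str.len lines[i] : Int) - (PySem.Str.len (PySem.Str.lstrip lines[i]) : Int) > ci), if_neg h2,
            show ((i : Int) + 1) = ((i + 1 : Nat) : Int) by push_cast; ring,
            ih (i + 1) _ (by omega)]
          have hge : i + 1 ≤ pvFE lines ci (i + 1) := pvFE_ge lines ci (i + 1)
          congr 2
          rw [List.append_assoc]
          congr 1
          unfold pvProj
          rw [List.drop_eq_getElem_cons h,
            show pvFE lines ci (i + 1) - i = (pvFE lines ci (i + 1) - (i + 1)) + 1 by omega,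
            List.take_succ_cons, List.filter_cons]
          simp [h1]
    · have hI : ¬ ((i : Int) < (lines.length : Int)) := by exact_mod_cast h
      rw [pvLoopA, if_neg hI, pvFE_stop lines ci i (by omega)]
      unfold pvProj
      simp

-- ===== VERDICT (by name: the statement is the Claim_ definition above) =====
theorem parse_multiline_text_spec : Claim_equal_parse_multiline_text := by
  intro lines s ci _ hpre
  have hs0 : 0 ≤ s := hpre
  unfold Spec_parse_multiline_text parse_multiline_text parse_multiline_text_alt
  by_cases hge : s ≥ (lines.length : Int)
  · rw [if_pos hge, if_pos hge]
  · rw [if_neg hge, if_neg hge]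
    have hs : s = ((s.toNat : Nat) : Int) := by omega
    rw [hs, pvLoopA_eq lines ci _ s.toNat [] (by omega),
      pvFindEnd_eq_pvFE lines ci _ s.toNat (by omega)]
    simp only [List.nil_append]
    rw [PySem.List.slice_natCast]
    rfl
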